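-- pv_equiv track=rewrite | github.com/mworion/MountWizzard4 | mw4/logic/keypad/keypad.py | expand7to8
-- ===== SOURCE A (Python) =====
-- def expand7to8(value, fill=False):
--     """
--     :param value:
--     :param fill:
--     :return:
--     """
--     result = []
--     n = 0
--     o = 0
--     for r in range(0, len(value)):
--         n += 7
--         o = (value[r] & 127) | (o << 7)
--         if n >= 8:
--             u = (o >> (n - 8)) & 255
--             n -= 8
--             result.append(u)
--     if fill and n > 0:
--         u = (o << (8 - n)) & 255
--         result.append(u)
--     return result
-- ===== SOURCE B (Python) =====
-- def expand7to8(value, fill=False):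
--     """Chunked closed-form rewrite: 56 bits = 8 values = exactly 7 bytes, so the
--     stream splits into independent blocks of 8 values; byte j of a block is a
--     fixed two-value formula, with no running bit accumulator at all."""
--     result = []
--     rest = [v & 127 for v in value]
--     pos = 0
--     while pos + 8 <= len(rest):
--         for j in range(7):
--             result.append(((rest[pos + j] << (j + 1)) | (rest[pos + j + 1] >> (6 - j))) & 255)
--         pos += 8
--     tail = rest[pos:]
--     s = len(tail)
--     for j in range(s - 1):  # a final block of s < 8 values yields s-1 complete bytes
--         result.append(((tail[j] << (j + 1)) | (tail[j + 1] >> (6 - j))) & 255)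
--     if fill and s:
--         result.append((tail[s - 1] & ((1 << (8 - s)) - 1)) << s)
--     return result
-- ===== Notes on version B (the rewrite author's own statement) =====
-- stated objective: faster
-- what changed: A threads a sequential bit accumulator (o << 7 each step, so the integer grows with the whole stream); B exploits that 8 values = 56 bits = exactly 7 bytes, splits the input into independent blocks of 8 and computes each output byte by a fixed closed-form two-value formula, with no running accumulator.
import Mathlib
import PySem

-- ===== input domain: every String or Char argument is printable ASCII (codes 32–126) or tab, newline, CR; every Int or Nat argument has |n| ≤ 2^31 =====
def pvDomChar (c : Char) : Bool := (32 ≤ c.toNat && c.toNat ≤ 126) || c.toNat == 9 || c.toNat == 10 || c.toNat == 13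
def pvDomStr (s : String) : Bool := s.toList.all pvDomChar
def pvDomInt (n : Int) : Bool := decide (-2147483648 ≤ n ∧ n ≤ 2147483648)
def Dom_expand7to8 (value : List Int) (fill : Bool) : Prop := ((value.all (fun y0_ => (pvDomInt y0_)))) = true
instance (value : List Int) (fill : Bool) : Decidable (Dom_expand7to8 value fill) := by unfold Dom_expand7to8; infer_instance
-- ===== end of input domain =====

-- B replaces A's sequential ever-growing bit accumulator with independent blocks of
-- 8 values (56 bits = exactly 7 bytes) and a closed-form two-value formula per byte.

-- ===== PORT A =====
-- loop body of A: state (result, n, o); n += 7; o = (v & 127) | (o << 7); emit a byte when n ≥ 8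
def stepA (st : List Int × Int × Int) (v : Int) : List Int × Int × Int :=
  let n := st.2.1 + 7
  let o := PySem.Int.bor (PySem.Int.band v 127) (st.2.2 <<< (7 : Nat))
  if 8 ≤ n then (st.1 ++ [PySem.Int.band (o >>> (n - 8).toNat) 255], n - 8, o)
  else (st.1, n, o)

def expand7to8 (value : List Int) (fill : Bool) : List Int :=
  let st := value.foldl stepA ([], 0, 0)
  if fill = true ∧ 0 < st.2.1 then st.1 ++ [PySem.Int.band (st.2.2 <<< (8 - st.2.1).toNat) 255]
  else st.1

-- ===== PORT B =====
-- rest = [v & 127 for v in value]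
def maskList (value : List Int) : List Int := value.map (fun v => PySem.Int.band v 127)

-- byte j of a block c: ((c[j] << (j+1)) | (c[j+1] >> (6-j))) & 255
def blockByte (c : List Int) (j : Nat) : Int :=
  PySem.Int.band (PySem.Int.bor ((c.getD j 0) <<< (j + 1)) ((c.getD (j + 1) 0) >>> (6 - j))) 255

-- the while-loop: peel blocks of 8 masked values, 7 bytes each; returns (bytes, final rest)
def altBlocks : List Int → List Int × List Int
  | b0 :: b1 :: b2 :: b3 :: b4 :: b5 :: b6 :: b7 :: rest =>
      let p := altBlocks rest
      ((List.range 7).map (blockByte [b0, b1, b2, b3, b4, b5, b6, b7]) ++ p.1, p.2)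
  | rest => ([], rest)

def expand7to8_alt (value : List Int) (fill : Bool) : List Int :=
  let p := altBlocks (maskList value)
  let s := p.2.length
  p.1 ++ (List.range (s - 1)).map (blockByte p.2) ++
    (if fill = true ∧ s ≠ 0 then
      [(PySem.Int.band (p.2.getD (s - 1) 0) ((1:Int) <<< (8 - s) - 1)) <<< s]
     else [])

-- ===== PRECONDITION & SPEC =====
def Spec_expand7to8 (value : List Int) (fill : Bool) (out : List Int) : Prop := out = expand7to8_alt value fill
instance (value : List Int) (fill : Bool) (out : List Int) : Decidable (Spec_expand7to8 value fill out) := by unfold Spec_expand7to8; infer_instance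

-- ===== CLAIM (what is proved, stated in full; the proofs are below) =====
def Claim_equal_expand7to8 : Prop := ∀ (value : List Int) (fill : Bool), Dom_expand7to8 value fill → Spec_expand7to8 value fill (expand7to8 value fill)

-- ===== LEMMAS AND PROOFS =====

lemma band_pow2 (a : Int) (k : Nat) (h : 0 ≤ a) : PySem.Int.band a (2^k - 1) = a % 2^k := by
  rw [show ((2:Int)^k - 1) = ((2^k - 1 : Nat) : Int) from by
        push_cast [Nat.one_le_two_pow]; ring]
  rw [PySem.Int.band_of_nonneg h (by positivity), Int.toNat_natCast,
      Nat.and_two_pow_sub_one_eq_mod]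
  push_cast [Int.toNat_of_nonneg h]
  rfl

lemma band127 (v : Int) : PySem.Int.band v 127 = v % 128 := by
  by_cases hv : 0 ≤ v
  · have h := band_pow2 v 7 hv
    norm_num at h
    exact h
  · unfold PySem.Int.band
    rw [if_neg hv, if_pos (by norm_num : (0:Int) ≤ 127)]
    have h2 : (127 : Int).toNat &&& (-v-1).toNat = (-v-1).toNat % 128 := by
      rw [show (127:Int).toNat = 127 from rfl, Nat.and_comm]
      simpa using Nat.and_two_pow_sub_one_eq_mod (-v-1).toNat 7
    rw [h2]
    omega

lemma band255 (a : Int) (h : 0 ≤ a) : PySem.Int.band a 255 = a % 256 := by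
  simpa using band_pow2 a 8 h

lemma mask_low (a : Int) (j : Nat) (h : 0 ≤ a) : PySem.Int.band a ((1:Int) <<< j - 1) = a % 2^j := by
  rw [Int.shiftLeft_eq, one_mul, band_pow2 _ _ h]

lemma shiftr_div (a : Int) (k : Nat) : a >>> k = a / 2^k := by
  rw [Int.shiftRight_eq_div_pow]; norm_num

lemma bor_disjoint (x y : Int) (k : Nat) (hx : 0 ≤ x) (hy : 0 ≤ y) (h : y < 2^k) :
    PySem.Int.bor (x <<< k) y = x * 2^k + y := by
  have hy' : y.toNat < 2^k := by
    have : (y.toNat : Int) < (2:Int)^k := by rwa [Int.toNat_of_nonneg hy]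
    exact_mod_cast this
  have hxk : (0:Int) ≤ x <<< k := by rw [Int.shiftLeft_eq]; positivity
  rw [PySem.Int.bor_of_nonneg hxk hy]
  have h1 : (x <<< k).toNat = x.toNat <<< k := by
    rw [Int.shiftLeft_eq, Nat.shiftLeft_eq]
    have : ((x.toNat * 2^k : Nat) : Int) = x * 2^k := by
      push_cast [Int.toNat_of_nonneg hx]; ring
    omega
  rw [h1, ← Nat.shiftLeft_add_eq_or_of_lt hy']
  push_cast [Nat.shiftLeft_eq, Int.toNat_of_nonneg hx, Int.toNat_of_nonneg hy]
  ring

-- the byte A emits from its big accumulator equals B's two-value closed form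
lemma byte_core (H a b : Int) (n : Nat) (hH : 0 ≤ H) (ha0 : 0 ≤ a) (_ha : a < 128)
    (hb0 : 0 ≤ b) (hb : b < 128) (hn : n ≤ 6) :
    PySem.Int.band (((H * 128 + a) * 128 + b) >>> n) 255
      = PySem.Int.band (PySem.Int.bor (a <<< (7 - n)) (b >>> n)) 255 := by
  have hx : (0:Int) ≤ (H * 128 + a) * 128 + b := by nlinarith
  have hdiv0 : 0 ≤ b / 2^n := Int.ediv_nonneg hb0 (by positivity)
  have hdivlt : b / 2^n < 2^(7 - n) := by
    rw [Int.ediv_lt_iff_lt_mul (by positivity)]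
    calc b < 128 := hb
    _ ≤ 2^(7 - n) * 2^n := by
        rw [← pow_add, show 7 - n + n = 7 from by omega]; norm_num
  rw [shiftr_div, shiftr_div, bor_disjoint a (b / 2^n) (7 - n) ha0 hdiv0 hdivlt]
  rw [band255 _ (Int.ediv_nonneg hx (by positivity)), band255 _ (by positivity)]
  interval_cases n <;> ring_nf <;> omega

-- the trailing fill byte agrees with B's masked-last-value form
lemma fill_core (H b : Int) (s : Nat) (hH : 0 ≤ H) (hb0 : 0 ≤ b) (_hb : b < 128)
    (h1 : 1 ≤ s) (h7 : s ≤ 7) :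
    PySem.Int.band ((H * 128 + b) <<< s) 255
      = (PySem.Int.band b ((1:Int) <<< (8 - s) - 1)) <<< s := by
  have hx : (0:Int) ≤ H * 128 + b := by nlinarith
  rw [Int.shiftLeft_eq, band255 _ (by positivity), mask_low b (8 - s) hb0, Int.shiftLeft_eq]
  interval_cases s <;> ring_nf <;> omega

lemma stepA_noemit (res : List Int) (o v : Int) (ho : 0 ≤ o) :
    stepA (res, 0, o) v = (res, 7, o * 128 + v % 128) := by
  unfold stepA
  rw [band127, PySem.Int.bor_comm,
      bor_disjoint o (v % 128) 7 ho (Int.emod_nonneg v (by norm_num)) (by omega)]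
  norm_num

lemma stepA_emit (res : List Int) (n o v : Int) (ho : 0 ≤ o) (h1 : 1 ≤ n) (h7 : n ≤ 7) :
    stepA (res, n, o) v
      = (res ++ [PySem.Int.band ((o * 128 + v % 128) >>> (n - 1).toNat) 255], n - 1,
         o * 128 + v % 128) := by
  unfold stepA
  rw [band127, PySem.Int.bor_comm,
      bor_disjoint o (v % 128) 7 ho (Int.emod_nonneg v (by norm_num)) (by omega)]
  rw [if_pos (show (8:Int) ≤ (res, n, o).2.1 + 7 by dsimp only; omega)]
  dsimp only
  rw [show n + 7 - 8 = n - 1 from by omega]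
  norm_num

lemma stepA7 (res : List Int) (o v : Int) (ho : 0 ≤ o) :
    stepA (res, 7, o) v
      = (res ++ [PySem.Int.band ((o * 128 + v % 128) >>> (6:Nat)) 255], 6, o * 128 + v % 128) := by
  have h := stepA_emit res 7 o v ho (by norm_num) (by norm_num); norm_num at h; exact h

lemma stepA6 (res : List Int) (o v : Int) (ho : 0 ≤ o) :
    stepA (res, 6, o) v
      = (res ++ [PySem.Int.band ((o * 128 + v % 128) >>> (5:Nat)) 255], 5, o * 128 + v % 128) := by
  have h := stepA_emit res 6 o v ho (by norm_num) (by norm_num); norm_num at h; exact h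

lemma stepA5 (res : List Int) (o v : Int) (ho : 0 ≤ o) :
    stepA (res, 5, o) v
      = (res ++ [PySem.Int.band ((o * 128 + v % 128) >>> (4:Nat)) 255], 4, o * 128 + v % 128) := by
  have h := stepA_emit res 5 o v ho (by norm_num) (by norm_num); norm_num at h; exact h

lemma stepA4 (res : List Int) (o v : Int) (ho : 0 ≤ o) :
    stepA (res, 4, o) v
      = (res ++ [PySem.Int.band ((o * 128 + v % 128) >>> (3:Nat)) 255], 3, o * 128 + v % 128) := by
  have h := stepA_emit res 4 o v ho (by norm_num) (by norm_num); norm_num at h; exact h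

lemma stepA3 (res : List Int) (o v : Int) (ho : 0 ≤ o) :
    stepA (res, 3, o) v
      = (res ++ [PySem.Int.band ((o * 128 + v % 128) >>> (2:Nat)) 255], 2, o * 128 + v % 128) := by
  have h := stepA_emit res 3 o v ho (by norm_num) (by norm_num); norm_num at h; exact h

lemma stepA2 (res : List Int) (o v : Int) (ho : 0 ≤ o) :
    stepA (res, 2, o) v
      = (res ++ [PySem.Int.band ((o * 128 + v % 128) >>> (1:Nat)) 255], 1, o * 128 + v % 128) := by
  have h := stepA_emit res 2 o v ho (by norm_num) (by norm_num); norm_num at h; exact h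

lemma stepA1 (res : List Int) (o v : Int) (ho : 0 ≤ o) :
    stepA (res, 1, o) v
      = (res ++ [PySem.Int.band (o * 128 + v % 128) 255], 0, o * 128 + v % 128) := by
  have h := stepA_emit res 1 o v ho (by norm_num) (by norm_num); norm_num at h; exact h

theorem altBlocks_len : ∀ (l : List Int), (altBlocks l).2.length < 8
  | [] => by simp [altBlocks]
  | [a0] => by simp [altBlocks]
  | [a0, a1] => by simp [altBlocks]
  | [a0, a1, a2] => by simp [altBlocks]
  | [a0, a1, a2, a3] => by simp [altBlocks]
  | [a0, a1, a2, a3, a4] => by simp [altBlocks]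
  | [a0, a1, a2, a3, a4, a5] => by simp [altBlocks]
  | [a0, a1, a2, a3, a4, a5, a6] => by simp [altBlocks]
  | a0 :: a1 :: a2 :: a3 :: a4 :: a5 :: a6 :: a7 :: rest => by
      simpa [altBlocks] using altBlocks_len rest

theorem main : ∀ (vs res : List Int) (o : Int), 0 ≤ o →
    ((vs.foldl stepA (res, 0, o)).1
        = res ++ (altBlocks (maskList vs)).1
            ++ (List.range ((altBlocks (maskList vs)).2.length - 1)).map
                 (blockByte (altBlocks (maskList vs)).2))
    ∧ (vs.foldl stepA (res, 0, o)).2.1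
        = (if (altBlocks (maskList vs)).2.length = 0 then 0
           else 8 - ((altBlocks (maskList vs)).2.length : Int))
    ∧ 0 ≤ (vs.foldl stepA (res, 0, o)).2.2
    ∧ ((altBlocks (maskList vs)).2.length ≠ 0 →
        PySem.Int.band ((vs.foldl stepA (res, 0, o)).2.2 <<< (altBlocks (maskList vs)).2.length) 255
          = (PySem.Int.band ((altBlocks (maskList vs)).2.getD ((altBlocks (maskList vs)).2.length - 1) 0)
               ((1:Int) <<< (8 - (altBlocks (maskList vs)).2.length) - 1))
              <<< (altBlocks (maskList vs)).2.length)
  | [], res, o, ho => by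
      refine ⟨by simp [altBlocks, maskList], by simp [altBlocks, maskList], ho, ?_⟩
      intro h
      simp [altBlocks, maskList] at h
  | [v0], res, o, ho => by
      simp only [List.foldl_cons, List.foldl_nil]
      rw [stepA_noemit res o v0 ho]
      set o1 := o * 128 + v0 % 128 with ho1
      refine ⟨by simp [altBlocks, maskList], by norm_num [altBlocks, maskList],
        by show (0:Int) ≤ o1; omega, ?_⟩
      intro _
      norm_num [altBlocks, maskList, band127, List.getD_cons_zero]
      rw [ho1]
      have h := fill_core o (v0 % 128) 1 (by omega) (by omega) (by omega) (by norm_num) (by norm_num)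
      norm_num at h ⊢
      exact h
  | [v0, v1], res, o, ho => by
    simp only [List.foldl_cons, List.foldl_nil]
    rw [stepA_noemit res o v0 ho]
    set o1 := o * 128 + v0 % 128 with ho1
    rw [stepA7 _ o1 v1 (by omega)]
    set o2 := o1 * 128 + v1 % 128 with ho2
    have B0 : PySem.Int.band (o2 >>> (6:Nat)) 255
        = PySem.Int.band (PySem.Int.bor ((v0 % 128) <<< (1:Nat)) ((v1 % 128) >>> (6:Nat))) 255 := by
      rw [ho2, ho1]
      have h := byte_core o (v0 % 128) (v1 % 128) 6 (by omega) (by omega) (by omega) (by omega) (by omega) (by norm_num)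
      norm_num at h ⊢
      exact h
    refine ⟨?_, by norm_num [altBlocks, maskList], by show (0:Int) ≤ o2; omega, ?_⟩
    · simp [altBlocks, maskList, blockByte, List.range_succ, band127, B0]
    · intro _
      norm_num [altBlocks, maskList, band127, List.getD_cons_zero, List.getD_cons_succ]
      rw [ho2]
      have h := fill_core o1 (v1 % 128) 2 (by omega) (by omega) (by omega) (by norm_num) (by norm_num)
      norm_num at h ⊢
      exact h
  | [v0, v1, v2], res, o, ho => by
    simp only [List.foldl_cons, List.foldl_nil]
    rw [stepA_noemit res o v0 ho]
    set o1 := o * 128 + v0 % 128 with ho1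
    rw [stepA7 _ o1 v1 (by omega)]
    set o2 := o1 * 128 + v1 % 128 with ho2
    rw [stepA6 _ o2 v2 (by omega)]
    set o3 := o2 * 128 + v2 % 128 with ho3
    have B0 : PySem.Int.band (o2 >>> (6:Nat)) 255
        = PySem.Int.band (PySem.Int.bor ((v0 % 128) <<< (1:Nat)) ((v1 % 128) >>> (6:Nat))) 255 := by
      rw [ho2, ho1]
      have h := byte_core o (v0 % 128) (v1 % 128) 6 (by omega) (by omega) (by omega) (by omega) (by omega) (by norm_num)
      norm_num at h ⊢
      exact h
    have B1 : PySem.Int.band (o3 >>> (5:Nat)) 255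
        = PySem.Int.band (PySem.Int.bor ((v1 % 128) <<< (2:Nat)) ((v2 % 128) >>> (5:Nat))) 255 := by
      rw [ho3, ho2]
      have h := byte_core o1 (v1 % 128) (v2 % 128) 5 (by omega) (by omega) (by omega) (by omega) (by omega) (by norm_num)
      norm_num at h ⊢
      exact h
    refine ⟨?_, by norm_num [altBlocks, maskList], by show (0:Int) ≤ o3; omega, ?_⟩
    · simp [altBlocks, maskList, blockByte, List.range_succ, band127, B0, B1, List.append_assoc]
    · intro _
      norm_num [altBlocks, maskList, band127, List.getD_cons_zero, List.getD_cons_succ]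
      rw [ho3]
      have h := fill_core o2 (v2 % 128) 3 (by omega) (by omega) (by omega) (by norm_num) (by norm_num)
      norm_num at h ⊢
      exact h
  | [v0, v1, v2, v3], res, o, ho => by
    simp only [List.foldl_cons, List.foldl_nil]
    rw [stepA_noemit res o v0 ho]
    set o1 := o * 128 + v0 % 128 with ho1
    rw [stepA7 _ o1 v1 (by omega)]
    set o2 := o1 * 128 + v1 % 128 with ho2
    rw [stepA6 _ o2 v2 (by omega)]
    set o3 := o2 * 128 + v2 % 128 with ho3
    rw [stepA5 _ o3 v3 (by omega)]
    set o4 := o3 * 128 + v3 % 128 with ho4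
    have B0 : PySem.Int.band (o2 >>> (6:Nat)) 255
        = PySem.Int.band (PySem.Int.bor ((v0 % 128) <<< (1:Nat)) ((v1 % 128) >>> (6:Nat))) 255 := by
      rw [ho2, ho1]
      have h := byte_core o (v0 % 128) (v1 % 128) 6 (by omega) (by omega) (by omega) (by omega) (by omega) (by norm_num)
      norm_num at h ⊢
      exact h
    have B1 : PySem.Int.band (o3 >>> (5:Nat)) 255
        = PySem.Int.band (PySem.Int.bor ((v1 % 128) <<< (2:Nat)) ((v2 % 128) >>> (5:Nat))) 255 := by
      rw [ho3, ho2]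
      have h := byte_core o1 (v1 % 128) (v2 % 128) 5 (by omega) (by omega) (by omega) (by omega) (by omega) (by norm_num)
      norm_num at h ⊢
      exact h
    have B2 : PySem.Int.band (o4 >>> (4:Nat)) 255
        = PySem.Int.band (PySem.Int.bor ((v2 % 128) <<< (3:Nat)) ((v3 % 128) >>> (4:Nat))) 255 := by
      rw [ho4, ho3]
      have h := byte_core o2 (v2 % 128) (v3 % 128) 4 (by omega) (by omega) (by omega) (by omega) (by omega) (by norm_num)
      norm_num at h ⊢
      exact h
    refine ⟨?_, by norm_num [altBlocks, maskList], by show (0:Int) ≤ o4; omega, ?_⟩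
    · simp [altBlocks, maskList, blockByte, List.range_succ, band127, B0, B1, B2, List.append_assoc]
    · intro _
      norm_num [altBlocks, maskList, band127, List.getD_cons_zero, List.getD_cons_succ]
      rw [ho4]
      have h := fill_core o3 (v3 % 128) 4 (by omega) (by omega) (by omega) (by norm_num) (by norm_num)
      norm_num at h ⊢
      exact h
  | [v0, v1, v2, v3, v4], res, o, ho => by
    simp only [List.foldl_cons, List.foldl_nil]
    rw [stepA_noemit res o v0 ho]
    set o1 := o * 128 + v0 % 128 with ho1
    rw [stepA7 _ o1 v1 (by omega)]
    set o2 := o1 * 128 + v1 % 128 with ho2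
    rw [stepA6 _ o2 v2 (by omega)]
    set o3 := o2 * 128 + v2 % 128 with ho3
    rw [stepA5 _ o3 v3 (by omega)]
    set o4 := o3 * 128 + v3 % 128 with ho4
    rw [stepA4 _ o4 v4 (by omega)]
    set o5 := o4 * 128 + v4 % 128 with ho5
    have B0 : PySem.Int.band (o2 >>> (6:Nat)) 255
        = PySem.Int.band (PySem.Int.bor ((v0 % 128) <<< (1:Nat)) ((v1 % 128) >>> (6:Nat))) 255 := by
      rw [ho2, ho1]
      have h := byte_core o (v0 % 128) (v1 % 128) 6 (by omega) (by omega) (by omega) (by omega) (by omega) (by norm_num)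
      norm_num at h ⊢
      exact h
    have B1 : PySem.Int.band (o3 >>> (5:Nat)) 255
        = PySem.Int.band (PySem.Int.bor ((v1 % 128) <<< (2:Nat)) ((v2 % 128) >>> (5:Nat))) 255 := by
      rw [ho3, ho2]
      have h := byte_core o1 (v1 % 128) (v2 % 128) 5 (by omega) (by omega) (by omega) (by omega) (by omega) (by norm_num)
      norm_num at h ⊢
      exact h
    have B2 : PySem.Int.band (o4 >>> (4:Nat)) 255
        = PySem.Int.band (PySem.Int.bor ((v2 % 128) <<< (3:Nat)) ((v3 % 128) >>> (4:Nat))) 255 := by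
      rw [ho4, ho3]
      have h := byte_core o2 (v2 % 128) (v3 % 128) 4 (by omega) (by omega) (by omega) (by omega) (by omega) (by norm_num)
      norm_num at h ⊢
      exact h
    have B3 : PySem.Int.band (o5 >>> (3:Nat)) 255
        = PySem.Int.band (PySem.Int.bor ((v3 % 128) <<< (4:Nat)) ((v4 % 128) >>> (3:Nat))) 255 := by
      rw [ho5, ho4]
      have h := byte_core o3 (v3 % 128) (v4 % 128) 3 (by omega) (by omega) (by omega) (by omega) (by omega) (by norm_num)
      norm_num at h ⊢
      exact h
    refine ⟨?_, by norm_num [altBlocks, maskList], by show (0:Int) ≤ o5; omega, ?_⟩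
    · simp [altBlocks, maskList, blockByte, List.range_succ, band127, B0, B1, B2, B3, List.append_assoc]
    · intro _
      norm_num [altBlocks, maskList, band127, List.getD_cons_zero, List.getD_cons_succ]
      rw [ho5]
      have h := fill_core o4 (v4 % 128) 5 (by omega) (by omega) (by omega) (by norm_num) (by norm_num)
      norm_num at h ⊢
      exact h
  | [v0, v1, v2, v3, v4, v5], res, o, ho => by
    simp only [List.foldl_cons, List.foldl_nil]
    rw [stepA_noemit res o v0 ho]
    set o1 := o * 128 + v0 % 128 with ho1
    rw [stepA7 _ o1 v1 (by omega)]
    set o2 := o1 * 128 + v1 % 128 with ho2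
    rw [stepA6 _ o2 v2 (by omega)]
    set o3 := o2 * 128 + v2 % 128 with ho3
    rw [stepA5 _ o3 v3 (by omega)]
    set o4 := o3 * 128 + v3 % 128 with ho4
    rw [stepA4 _ o4 v4 (by omega)]
    set o5 := o4 * 128 + v4 % 128 with ho5
    rw [stepA3 _ o5 v5 (by omega)]
    set o6 := o5 * 128 + v5 % 128 with ho6
    have B0 : PySem.Int.band (o2 >>> (6:Nat)) 255
        = PySem.Int.band (PySem.Int.bor ((v0 % 128) <<< (1:Nat)) ((v1 % 128) >>> (6:Nat))) 255 := by
      rw [ho2, ho1]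
      have h := byte_core o (v0 % 128) (v1 % 128) 6 (by omega) (by omega) (by omega) (by omega) (by omega) (by norm_num)
      norm_num at h ⊢
      exact h
    have B1 : PySem.Int.band (o3 >>> (5:Nat)) 255
        = PySem.Int.band (PySem.Int.bor ((v1 % 128) <<< (2:Nat)) ((v2 % 128) >>> (5:Nat))) 255 := by
      rw [ho3, ho2]
      have h := byte_core o1 (v1 % 128) (v2 % 128) 5 (by omega) (by omega) (by omega) (by omega) (by omega) (by norm_num)
      norm_num at h ⊢
      exact h
    have B2 : PySem.Int.band (o4 >>> (4:Nat)) 255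
        = PySem.Int.band (PySem.Int.bor ((v2 % 128) <<< (3:Nat)) ((v3 % 128) >>> (4:Nat))) 255 := by
      rw [ho4, ho3]
      have h := byte_core o2 (v2 % 128) (v3 % 128) 4 (by omega) (by omega) (by omega) (by omega) (by omega) (by norm_num)
      norm_num at h ⊢
      exact h
    have B3 : PySem.Int.band (o5 >>> (3:Nat)) 255
        = PySem.Int.band (PySem.Int.bor ((v3 % 128) <<< (4:Nat)) ((v4 % 128) >>> (3:Nat))) 255 := by
      rw [ho5, ho4]
      have h := byte_core o3 (v3 % 128) (v4 % 128) 3 (by omega) (by omega) (by omega) (by omega) (by omega) (by norm_num)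
      norm_num at h ⊢
      exact h
    have B4 : PySem.Int.band (o6 >>> (2:Nat)) 255
        = PySem.Int.band (PySem.Int.bor ((v4 % 128) <<< (5:Nat)) ((v5 % 128) >>> (2:Nat))) 255 := by
      rw [ho6, ho5]
      have h := byte_core o4 (v4 % 128) (v5 % 128) 2 (by omega) (by omega) (by omega) (by omega) (by omega) (by norm_num)
      norm_num at h ⊢
      exact h
    refine ⟨?_, by norm_num [altBlocks, maskList], by show (0:Int) ≤ o6; omega, ?_⟩
    · simp [altBlocks, maskList, blockByte, List.range_succ, band127, B0, B1, B2, B3, B4, List.append_assoc]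
    · intro _
      norm_num [altBlocks, maskList, band127, List.getD_cons_zero, List.getD_cons_succ]
      rw [ho6]
      have h := fill_core o5 (v5 % 128) 6 (by omega) (by omega) (by omega) (by norm_num) (by norm_num)
      norm_num at h ⊢
      exact h
  | [v0, v1, v2, v3, v4, v5, v6], res, o, ho => by
    simp only [List.foldl_cons, List.foldl_nil]
    rw [stepA_noemit res o v0 ho]
    set o1 := o * 128 + v0 % 128 with ho1
    rw [stepA7 _ o1 v1 (by omega)]
    set o2 := o1 * 128 + v1 % 128 with ho2
    rw [stepA6 _ o2 v2 (by omega)]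
    set o3 := o2 * 128 + v2 % 128 with ho3
    rw [stepA5 _ o3 v3 (by omega)]
    set o4 := o3 * 128 + v3 % 128 with ho4
    rw [stepA4 _ o4 v4 (by omega)]
    set o5 := o4 * 128 + v4 % 128 with ho5
    rw [stepA3 _ o5 v5 (by omega)]
    set o6 := o5 * 128 + v5 % 128 with ho6
    rw [stepA2 _ o6 v6 (by omega)]
    set o7 := o6 * 128 + v6 % 128 with ho7
    have B0 : PySem.Int.band (o2 >>> (6:Nat)) 255
        = PySem.Int.band (PySem.Int.bor ((v0 % 128) <<< (1:Nat)) ((v1 % 128) >>> (6:Nat))) 255 := by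
      rw [ho2, ho1]
      have h := byte_core o (v0 % 128) (v1 % 128) 6 (by omega) (by omega) (by omega) (by omega) (by omega) (by norm_num)
      norm_num at h ⊢
      exact h
    have B1 : PySem.Int.band (o3 >>> (5:Nat)) 255
        = PySem.Int.band (PySem.Int.bor ((v1 % 128) <<< (2:Nat)) ((v2 % 128) >>> (5:Nat))) 255 := by
      rw [ho3, ho2]
      have h := byte_core o1 (v1 % 128) (v2 % 128) 5 (by omega) (by omega) (by omega) (by omega) (by omega) (by norm_num)
      norm_num at h ⊢
      exact h
    have B2 : PySem.Int.band (o4 >>> (4:Nat)) 255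
        = PySem.Int.band (PySem.Int.bor ((v2 % 128) <<< (3:Nat)) ((v3 % 128) >>> (4:Nat))) 255 := by
      rw [ho4, ho3]
      have h := byte_core o2 (v2 % 128) (v3 % 128) 4 (by omega) (by omega) (by omega) (by omega) (by omega) (by norm_num)
      norm_num at h ⊢
      exact h
    have B3 : PySem.Int.band (o5 >>> (3:Nat)) 255
        = PySem.Int.band (PySem.Int.bor ((v3 % 128) <<< (4:Nat)) ((v4 % 128) >>> (3:Nat))) 255 := by
      rw [ho5, ho4]
      have h := byte_core o3 (v3 % 128) (v4 % 128) 3 (by omega) (by omega) (by omega) (by omega) (by omega) (by norm_num)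
      norm_num at h ⊢
      exact h
    have B4 : PySem.Int.band (o6 >>> (2:Nat)) 255
        = PySem.Int.band (PySem.Int.bor ((v4 % 128) <<< (5:Nat)) ((v5 % 128) >>> (2:Nat))) 255 := by
      rw [ho6, ho5]
      have h := byte_core o4 (v4 % 128) (v5 % 128) 2 (by omega) (by omega) (by omega) (by omega) (by omega) (by norm_num)
      norm_num at h ⊢
      exact h
    have B5 : PySem.Int.band (o7 >>> (1:Nat)) 255
        = PySem.Int.band (PySem.Int.bor ((v5 % 128) <<< (6:Nat)) ((v6 % 128) >>> (1:Nat))) 255 := by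
      rw [ho7, ho6]
      have h := byte_core o5 (v5 % 128) (v6 % 128) 1 (by omega) (by omega) (by omega) (by omega) (by omega) (by norm_num)
      norm_num at h ⊢
      exact h
    refine ⟨?_, by norm_num [altBlocks, maskList], by show (0:Int) ≤ o7; omega, ?_⟩
    · simp [altBlocks, maskList, blockByte, List.range_succ, band127, B0, B1, B2, B3, B4, B5, List.append_assoc]
    · intro _
      norm_num [altBlocks, maskList, band127, List.getD_cons_zero, List.getD_cons_succ]
      rw [ho7]
      have h := fill_core o6 (v6 % 128) 7 (by omega) (by omega) (by omega) (by norm_num) (by norm_num)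
      norm_num at h ⊢
      exact h
  | v0 :: v1 :: v2 :: v3 :: v4 :: v5 :: v6 :: v7 :: rest, res, o, ho => by
    simp only [List.foldl_cons]
    rw [stepA_noemit res o v0 ho]
    set o1 := o * 128 + v0 % 128 with ho1
    rw [stepA7 _ o1 v1 (by omega)]
    set o2 := o1 * 128 + v1 % 128 with ho2
    rw [stepA6 _ o2 v2 (by omega)]
    set o3 := o2 * 128 + v2 % 128 with ho3
    rw [stepA5 _ o3 v3 (by omega)]
    set o4 := o3 * 128 + v3 % 128 with ho4
    rw [stepA4 _ o4 v4 (by omega)]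
    set o5 := o4 * 128 + v4 % 128 with ho5
    rw [stepA3 _ o5 v5 (by omega)]
    set o6 := o5 * 128 + v5 % 128 with ho6
    rw [stepA2 _ o6 v6 (by omega)]
    set o7 := o6 * 128 + v6 % 128 with ho7
    rw [stepA1 _ o7 v7 (by omega)]
    set o8 := o7 * 128 + v7 % 128 with ho8
    have B0 : PySem.Int.band (o2 >>> (6:Nat)) 255
        = PySem.Int.band (PySem.Int.bor ((v0 % 128) <<< (1:Nat)) ((v1 % 128) >>> (6:Nat))) 255 := by
      rw [ho2, ho1]
      have h := byte_core o (v0 % 128) (v1 % 128) 6 (by omega) (by omega) (by omega) (by omega) (by omega) (by norm_num)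
      norm_num at h ⊢
      exact h
    have B1 : PySem.Int.band (o3 >>> (5:Nat)) 255
        = PySem.Int.band (PySem.Int.bor ((v1 % 128) <<< (2:Nat)) ((v2 % 128) >>> (5:Nat))) 255 := by
      rw [ho3, ho2]
      have h := byte_core o1 (v1 % 128) (v2 % 128) 5 (by omega) (by omega) (by omega) (by omega) (by omega) (by norm_num)
      norm_num at h ⊢
      exact h
    have B2 : PySem.Int.band (o4 >>> (4:Nat)) 255
        = PySem.Int.band (PySem.Int.bor ((v2 % 128) <<< (3:Nat)) ((v3 % 128) >>> (4:Nat))) 255 := by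
      rw [ho4, ho3]
      have h := byte_core o2 (v2 % 128) (v3 % 128) 4 (by omega) (by omega) (by omega) (by omega) (by omega) (by norm_num)
      norm_num at h ⊢
      exact h
    have B3 : PySem.Int.band (o5 >>> (3:Nat)) 255
        = PySem.Int.band (PySem.Int.bor ((v3 % 128) <<< (4:Nat)) ((v4 % 128) >>> (3:Nat))) 255 := by
      rw [ho5, ho4]
      have h := byte_core o3 (v3 % 128) (v4 % 128) 3 (by omega) (by omega) (by omega) (by omega) (by omega) (by norm_num)
      norm_num at h ⊢
      exact h
    have B4 : PySem.Int.band (o6 >>> (2:Nat)) 255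
        = PySem.Int.band (PySem.Int.bor ((v4 % 128) <<< (5:Nat)) ((v5 % 128) >>> (2:Nat))) 255 := by
      rw [ho6, ho5]
      have h := byte_core o4 (v4 % 128) (v5 % 128) 2 (by omega) (by omega) (by omega) (by omega) (by omega) (by norm_num)
      norm_num at h ⊢
      exact h
    have B5 : PySem.Int.band (o7 >>> (1:Nat)) 255
        = PySem.Int.band (PySem.Int.bor ((v5 % 128) <<< (6:Nat)) ((v6 % 128) >>> (1:Nat))) 255 := by
      rw [ho7, ho6]
      have h := byte_core o5 (v5 % 128) (v6 % 128) 1 (by omega) (by omega) (by omega) (by omega) (by omega) (by norm_num)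
      norm_num at h ⊢
      exact h
    have B6 : PySem.Int.band o8 255
        = PySem.Int.band (PySem.Int.bor ((v6 % 128) <<< (7:Nat)) (v7 % 128)) 255 := by
      rw [ho8, ho7]
      have h := byte_core o6 (v6 % 128) (v7 % 128) 0 (by omega) (by omega) (by omega) (by omega) (by omega) (by norm_num)
      norm_num at h ⊢
      exact h
    have IH := main rest
    have hsnd : (altBlocks (maskList (v0 :: v1 :: v2 :: v3 :: v4 :: v5 :: v6 :: v7 :: rest))).2
        = (altBlocks (maskList rest)).2 := by simp [altBlocks, maskList]
    have hfst : (altBlocks (maskList (v0 :: v1 :: v2 :: v3 :: v4 :: v5 :: v6 :: v7 :: rest))).1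
        = (List.range 7).map (blockByte (maskList [v0, v1, v2, v3, v4, v5, v6, v7])) ++ (altBlocks (maskList rest)).1 := by
      simp [altBlocks, maskList]
    refine ⟨?_, ?_, (IH _ o8 (by omega)).2.2.1, ?_⟩
    · rw [(IH _ o8 (by omega)).1, hfst, hsnd]
      simp [maskList, blockByte, List.range_succ, band127, B0, B1, B2, B3, B4, B5, B6, List.append_assoc]
    · rw [(IH _ o8 (by omega)).2.1, hsnd]
    · rw [hsnd]
      intro hne
      exact (IH _ o8 (by omega)).2.2.2 hne

-- ===== VERDICT (by name: the statement is the Claim_ definition above) =====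
theorem expand7to8_spec : Claim_equal_expand7to8 := by
  unfold Claim_equal_expand7to8
  intro value fill _
  unfold Spec_expand7to8
  simp only [expand7to8, expand7to8_alt]
  obtain ⟨h1, h2, h3, h4⟩ := main value [] 0 le_rfl
  have hlen := altBlocks_len (maskList value)
  simp only [List.nil_append] at h1
  by_cases hz : (altBlocks (maskList value)).2.length = 0
  · rw [if_neg (by rw [h2, if_pos hz]; simp), if_neg (by simp [hz])]
    simpa using h1
  · have h2' : (value.foldl stepA ([], 0, 0)).2.1
        = 8 - ((altBlocks (maskList value)).2.length : Int) := by rw [h2, if_neg hz]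
    have hpos : 0 < (value.foldl stepA ([], 0, 0)).2.1 := by
      rw [h2']; omega
    have hsh : (8 - (value.foldl stepA ([], 0, 0)).2.1).toNat
        = (altBlocks (maskList value)).2.length := by rw [h2']; omega
    by_cases hf : fill = true
    · rw [if_pos ⟨hf, hpos⟩, if_pos ⟨hf, hz⟩, h1, hsh, h4 hz, List.append_assoc]
    · rw [if_neg (by tauto), if_neg (by tauto), h1]
      simp
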